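-- pv_equiv track=rewrite | github.com/vargax/ejemplos | python/assessment/gi.py | rodOffcut
-- ===== SOURCE A (Python) =====
-- def rodOffcut(lengths):
--     n = []
--     while len(lengths) > 0:
--         n.append(len(lengths))
--         m = min(lengths)
--
--         try:
--             while True:
--                 lengths.remove(m)
--         except ValueError:
--             pass
--
--         for i in range(len(lengths)):
--             lengths[i] -= m
--
--     return n
-- ===== SOURCE B (Python) =====
-- def rodOffcut(lengths):
--     # Sort once, then emit the count of remaining rods at each distinct level.
--     # Unlike A, this does not mutate the argument.
--     s = sorted(lengths)
--     out = []
--     while s: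
--         out.append(len(s))
--         v = s[0]
--         i = 0
--         while i < len(s) and s[i] == v:
--             i += 1
--         s = s[i:]
--     return out
-- ===== Notes on version B (the rewrite author's own statement) =====
-- stated objective: faster
-- what changed: A repeatedly scans the live list (min, remove-all, subtract) per distinct level, O(n^2); B sorts once and scans the sorted list, emitting the count of remaining elements at each distinct value, O(n log n). A empties its argument in place; B does not mutate it (return-value equivalence).
import Mathlib
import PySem

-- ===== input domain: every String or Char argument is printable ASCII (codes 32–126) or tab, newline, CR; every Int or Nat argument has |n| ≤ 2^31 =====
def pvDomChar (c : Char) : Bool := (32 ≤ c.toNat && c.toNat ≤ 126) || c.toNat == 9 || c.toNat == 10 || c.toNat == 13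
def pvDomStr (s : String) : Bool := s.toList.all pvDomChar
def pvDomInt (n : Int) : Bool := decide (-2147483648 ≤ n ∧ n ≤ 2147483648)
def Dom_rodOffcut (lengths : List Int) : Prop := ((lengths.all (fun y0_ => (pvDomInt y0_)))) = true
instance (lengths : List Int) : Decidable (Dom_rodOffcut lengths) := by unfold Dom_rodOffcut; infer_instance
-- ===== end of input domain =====

-- B sorts once and emits the count of remaining rods at each distinct level instead of A's
-- repeated min/remove/subtract scans; A empties its argument in place, B does not mutate it,
-- so the equivalence proved here is about the RETURN value only.

-- ===== PORT A =====

-- termination helper for the inner `while True: lengths.remove(m)` loop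
theorem pvRemove_lt {xs ys : List Int} {m : Int} (h : PySem.List.remove? xs m = some ys) :
    ys.length < xs.length := by
  have hm : m ∈ xs := by
    by_contra hn
    rw [(PySem.List.remove?_eq_none_iff xs m).mpr hn] at h
    simp at h
  rw [PySem.List.remove?_eq_some_erase xs m hm] at h
  cases h
  have h1 := xs.length_erase_of_mem hm
  have h2 := List.length_pos_of_mem hm
  omega

-- `try: while True: lengths.remove(m) except ValueError: pass` — remove all occurrences of m
def pvRemoveAll (xs : List Int) (m : Int) : List Int :=
  match h : PySem.List.remove? xs m with
  | some ys => pvRemoveAll ys m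
  | none => xs
termination_by xs.length
decreasing_by exact pvRemove_lt h

theorem pvRemoveAll_length_le (xs : List Int) (m : Int) : (pvRemoveAll xs m).length ≤ xs.length := by
  unfold pvRemoveAll
  split
  · next ys h => exact le_of_lt (lt_of_le_of_lt (pvRemoveAll_length_le ys m) (pvRemove_lt h))
  · exact le_rfl
termination_by xs.length
decreasing_by exact pvRemove_lt ‹_›

-- termination helper for A's outer while-loop: each round removes at least the minimum
theorem pvRemoveAll_length_lt {xs : List Int} {m : Int} (hm : m ∈ xs) :
    (pvRemoveAll xs m).length < xs.length := by
  unfold pvRemoveAll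
  split
  · next ys h => exact lt_of_le_of_lt (pvRemoveAll_length_le ys m) (pvRemove_lt h)
  · next h => exact absurd ((PySem.List.remove?_eq_none_iff xs m).mp h) (by simpa using hm)

-- A's outer `while len(lengths) > 0` loop; n is the accumulator list
def rodOffcutLoop (lengths : List Int) (n : List Int) : List Int :=
  if _hlen : lengths.length > 0 then
    match hm : PySem.List.min? lengths (fun x => x) with
    | some m =>
        rodOffcutLoop ((pvRemoveAll lengths m).map (fun x => x - m))
          (n ++ [(lengths.length : Int)])
    | none => n ++ [(lengths.length : Int)]  -- unreachable: min? is none only on []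
  else n
termination_by lengths.length
decreasing_by
  simpa using pvRemoveAll_length_lt (PySem.List.min?_mem hm)

def rodOffcut (lengths : List Int) : List Int := rodOffcutLoop lengths []

-- ===== PORT B =====

-- Source B's inner `while i < len(s) and s[i] == v: i += 1`
def pvLead (s : List Int) (v : Int) (i : Nat) : Nat :=
  if _h : i < s.length ∧ s[i]! == v then pvLead s v (i + 1) else i
termination_by s.length - i
decreasing_by omega

theorem pvLead_ge (s : List Int) (v : Int) (i : Nat) : i ≤ pvLead s v i := by
  rw [pvLead]
  split
  · next h => exact le_trans (Nat.le_succ i) (pvLead_ge s v (i + 1))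
  · exact le_rfl
termination_by s.length - i
decreasing_by omega

-- termination helper for Source B's outer loop: i advances past the head, so s[i:] is shorter
theorem pvLead_pos (v : Int) (rest : List Int) : 1 ≤ pvLead (v :: rest) v 0 := by
  rw [pvLead]
  rw [dif_pos (by constructor
                  · simp
                  · rw [getElem!_pos (v :: rest) 0 (by simp)]; simp)]
  exact pvLead_ge (v :: rest) v 1

-- Source B's outer `while s:` loop; `s = s[i:]` with 0 ≤ i ≤ len(s) is List.drop (exact there)
def rodOffcutAltLoop (s : List Int) (out : List Int) : List Int :=
  match s with
  | [] => out
  | v :: rest =>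
      rodOffcutAltLoop ((v :: rest).drop (pvLead (v :: rest) v 0))
        (out ++ [((v :: rest).length : Int)])
termination_by s.length
decreasing_by
  have := pvLead_pos v rest
  simp only [List.length_drop, List.length_cons]
  omega

def rodOffcut_alt (lengths : List Int) : List Int :=
  rodOffcutAltLoop (PySem.List.sorted lengths (fun x => x) false) []

-- ===== PRECONDITION & SPEC =====
def Spec_rodOffcut (lengths : List Int) (out : List Int) : Prop := out = rodOffcut_alt lengths
instance (lengths : List Int) (out : List Int) : Decidable (Spec_rodOffcut lengths out) := by unfold Spec_rodOffcut; infer_instance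

-- ===== CLAIM (what is proved, stated in full; the proofs are below) =====
def Claim_equal_rodOffcut : Prop := ∀ (lengths : List Int), Dom_rodOffcut lengths → Spec_rodOffcut lengths (rodOffcut lengths)

-- ===== LEMMAS AND PROOFS =====

-- pvLead counts the leading run of v starting at i
theorem pvLead_eq (s : List Int) (v : Int) (i : Nat) :
    pvLead s v i = i + ((s.drop i).takeWhile (fun x => x == v)).length := by
  rw [pvLead]
  split
  · next h =>
    obtain ⟨hi, hv⟩ := h
    have hdrop : s.drop i = s[i] :: s.drop (i + 1) := List.drop_eq_getElem_cons hi
    have hv' : s[i] = v := by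
      have : s[i]! = s[i] := getElem!_pos s i hi
      simpa [this] using hv
    rw [pvLead_eq s v (i + 1), hdrop, List.takeWhile_cons, hv']
    simp only [beq_self_eq_true, if_true, List.length_cons]
    omega
  · next h =>
    rcases Nat.lt_or_ge i s.length with hi | hi
    · have hv : ¬ (s[i]! == v) = true := fun hv => h ⟨hi, hv⟩
      have hdrop : s.drop i = s[i] :: s.drop (i + 1) := List.drop_eq_getElem_cons hi
      have hv' : ¬ (s[i] == v) = true := by
        have : s[i]! = s[i] := getElem!_pos s i hi
        rw [this] at hv; exact hv
      rw [hdrop, List.takeWhile_cons]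
      simp [hv']
    · rw [List.drop_eq_nil_of_le hi]
      simp
termination_by s.length - i
decreasing_by omega

theorem dropWhile_eq_drop_takeWhile (s : List Int) (p : Int → Bool) :
    s.dropWhile p = s.drop (s.takeWhile p).length := by
  induction s with
  | nil => rfl
  | cons x t ih =>
    by_cases hx : p x
    · simp [List.dropWhile_cons, List.takeWhile_cons, hx, ih]
    · simp [List.dropWhile_cons, List.takeWhile_cons, hx]

theorem drop_pvLead (v : Int) (rest : List Int) :
    (v :: rest).drop (pvLead (v :: rest) v 0) = rest.dropWhile (fun x => x == v) := by
  rw [pvLead_eq, Nat.zero_add, List.drop_zero, ← dropWhile_eq_drop_takeWhile]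
  simp [List.dropWhile_cons]

theorem filter_ne_erase (xs : List Int) (m : Int) :
    (xs.erase m).filter (fun x => !(x == m)) = xs.filter (fun x => !(x == m)) := by
  induction xs with
  | nil => rfl
  | cons x t ih =>
    by_cases hx : x = m
    · subst hx; simp [List.erase_cons_head]
    · rw [List.erase_cons_tail (by simpa using hx)]
      simp only [List.filter_cons]
      rw [ih]

theorem pvRemoveAll_eq_filter (xs : List Int) (m : Int) :
    pvRemoveAll xs m = xs.filter (fun x => !(x == m)) := by
  unfold pvRemoveAll
  split
  · next ys h =>
    have hm : m ∈ xs := by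
      by_contra hn
      rw [(PySem.List.remove?_eq_none_iff xs m).mpr hn] at h
      simp at h
    have hys : ys = xs.erase m := by
      rw [PySem.List.remove?_eq_some_erase xs m hm] at h
      injection h with h
      exact h.symm
    rw [pvRemoveAll_eq_filter ys m, hys, filter_ne_erase]
  · next h =>
    have hm : m ∉ xs := (PySem.List.remove?_eq_none_iff xs m).mp h
    symm
    rw [List.filter_eq_self]
    intro a ha
    simp only [Bool.not_eq_eq_eq_not, Bool.not_true, beq_eq_false_iff_ne, ne_eq]
    exact fun hh => hm (hh ▸ ha)
termination_by xs.length
decreasing_by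
  rw [hys]
  have h1 := xs.length_erase_of_mem hm
  have h2 := List.length_pos_of_mem hm
  omega

-- sorting commutes with filtering
theorem sorted_filter (xs : List Int) (p : Int → Bool) :
    PySem.List.sorted (xs.filter p) (fun x => x) false
      = (PySem.List.sorted xs (fun x => x) false).filter p := by
  apply PySem.List.sorted_id_eq_of_perm_of_pairwise
  · exact (PySem.List.sorted_perm xs (fun x => x) false).filter p
  · exact (PySem.List.sorted_pairwise xs (fun x => x)).filter p

-- sorting commutes with subtracting a constant
theorem sorted_map_sub (xs : List Int) (m : Int) :
    PySem.List.sorted (xs.map (fun x => x - m)) (fun x => x) false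
      = (PySem.List.sorted xs (fun x => x) false).map (fun x => x - m) := by
  apply PySem.List.sorted_id_eq_of_perm_of_pairwise
  · exact (PySem.List.sorted_perm xs (fun x => x) false).map _
  · rw [List.pairwise_map]
    exact (PySem.List.sorted_pairwise xs (fun x => x)).imp (by intro a b h; omega)

-- in a sorted list bounded below by m, dropping the leading m-run = filtering m out
theorem filter_ne_eq_dropWhile (t : List Int) (m : Int)
    (hp : t.Pairwise (fun a b => a ≤ b)) (hge : ∀ x ∈ t, m ≤ x) :
    t.filter (fun x => !(x == m)) = t.dropWhile (fun x => x == m) := by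
  induction t with
  | nil => rfl
  | cons x t ih =>
    rw [List.pairwise_cons] at hp
    by_cases hx : x = m
    · subst hx
      rw [List.filter_cons, List.dropWhile_cons]
      simp only [beq_self_eq_true, Bool.not_true, if_true]
      exact ih hp.2 (fun y hy => hp.1 y hy)
    · have hlt : m < x := lt_of_le_of_ne (hge x (List.mem_cons_self)) (fun h => hx h.symm)
      rw [List.filter_cons, List.dropWhile_cons]
      simp only [beq_iff_eq, hx, if_false, Bool.not_eq_eq_eq_not, Bool.not_false]
      rw [if_pos (by simpa using hx)]
      congr 1
      rw [List.filter_eq_self]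
      intro a ha
      have : x ≤ a := hp.1 a ha
      simp only [Bool.not_eq_eq_eq_not, Bool.not_true, beq_eq_false_iff_ne, ne_eq]
      omega

-- B's loop only looks at the equality pattern, so a constant shift does not change it
theorem altLoop_shift (s : List Int) (out : List Int) (m : Int) :
    rodOffcutAltLoop (s.map (fun x => x - m)) out = rodOffcutAltLoop s out := by
  match s with
  | [] => rfl
  | v :: rest =>
    have hlead : ∀ i, pvLead ((v :: rest).map (fun x => x - m)) (v - m) i
        = pvLead (v :: rest) v i := by
      intro i
      rw [pvLead_eq, pvLead_eq, ← List.map_drop]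
      congr 1
      induction ((v :: rest).drop i) with
      | nil => rfl
      | cons y t ih =>
        rw [List.map_cons, List.takeWhile_cons, List.takeWhile_cons]
        by_cases hy : y = v
        · subst hy; simpa using ih
        · rw [if_neg (by simpa using hy), if_neg (by simp; omega)]
    have hL : pvLead ((v - m) :: rest.map (fun x => x - m)) (v - m) 0
        = pvLead (v :: rest) v 0 := by
      have h0 := hlead 0
      simpa using h0
    have hdrop : ((v - m) :: rest.map (fun x => x - m)).drop (pvLead (v :: rest) v 0)
        = ((v :: rest).drop (pvLead (v :: rest) v 0)).map (fun x => x - m) := by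
      rw [List.map_drop]
      simp
    rw [List.map_cons, rodOffcutAltLoop, rodOffcutAltLoop, hL, hdrop]
    simp only [List.length_cons, List.length_map]
    exact altLoop_shift _ _ m
termination_by s.length
decreasing_by
  have := pvLead_pos v rest
  simp only [List.length_drop, List.length_cons]
  omega

-- main loop correspondence
theorem loop_eq (xs : List Int) (out : List Int) :
    rodOffcutLoop xs out = rodOffcutAltLoop (PySem.List.sorted xs (fun x => x) false) out := by
  match hxs : xs with
  | [] => rw [rodOffcutLoop]; simp [PySem.List.sorted, rodOffcutAltLoop]
  | a :: l =>
    rw [rodOffcutLoop]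
    rw [dif_pos (by simp)]
    have hne : (a :: l) ≠ [] := by simp
    obtain ⟨m, hm⟩ : ∃ m, PySem.List.min? (a :: l) (fun x => x) = some m := by
      cases h : PySem.List.min? (a :: l) (fun x => x) with
      | none => exact absurd ((PySem.List.min?_eq_none_iff _ _).mp h) hne
      | some m => exact ⟨m, rfl⟩
    obtain ⟨v, t, hs⟩ : ∃ v t, PySem.List.sorted (a :: l) (fun x => x) false = v :: t := by
      cases h : PySem.List.sorted (a :: l) (fun x => x) false with
      | nil => exact absurd ((PySem.List.sorted_eq_nil_iff _ _ _).mp h) hne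
      | cons v t => exact ⟨v, t, rfl⟩
    -- the head of the sorted list is the minimum
    have hvm : m = v := by
      have hv_mem : v ∈ (a :: l) := (PySem.List.mem_sorted _ _ _ _).mp (hs ▸ List.mem_cons_self)
      have hm_mem : m ∈ (a :: l) := PySem.List.min?_mem hm
      exact le_antisymm (PySem.List.min?_isMin hm v hv_mem)
        (PySem.List.key_head_sorted_le _ _ hs m hm_mem)
    subst hvm
    -- unfold one step of B's loop
    rw [hs, rodOffcutAltLoop, drop_pvLead, ← hs, PySem.List.length_sorted]
    -- one step of A's loop via the induction hypothesis
    split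
    · next m' hm' =>
      rw [hm] at hm'
      injection hm' with hm'
      subst hm'
      rw [loop_eq ((pvRemoveAll (a :: l) m).map (fun x => x - m)) (out ++ [((a :: l).length : Int)])]
      rw [pvRemoveAll_eq_filter, sorted_map_sub, altLoop_shift, sorted_filter, hs]
      -- filter the head away, then filter = dropWhile on the sorted tail
      have hpw : (m :: t).Pairwise (fun a b => a ≤ b) := by
        have := PySem.List.sorted_pairwise (a :: l) (fun x : Int => x)
        rwa [hs] at this
      rw [List.pairwise_cons] at hpw
      rw [List.filter_cons]
      simp only [beq_self_eq_true, Bool.not_true, if_false]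
      rw [filter_ne_eq_dropWhile t m hpw.2 (fun x hx => hpw.1 x hx)]
      simp
    · next hm' =>
      rw [hm] at hm'
      simp at hm' 
termination_by xs.length
decreasing_by simpa using pvRemoveAll_length_lt (PySem.List.min?_mem hm)

-- ===== VERDICT (by name: the statement is the Claim_ definition above) =====
theorem rodOffcut_spec : Claim_equal_rodOffcut := by
  intro lengths _
  unfold Spec_rodOffcut rodOffcut rodOffcut_alt
  exact loop_eq lengths []
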